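-- pv_equiv track=rewrite | github.com/EUNJIHA/daily-algorithm | 프로그래머스/크레인 인형뽑기 게임.py | solution
-- ===== SOURCE A (Python) =====
-- def solution(board, moves):
--     answer = 0
--
--     # board 빼기 쉽게 변형
--     realBoard = [[] for _ in range(len(board))]
--     for b in reversed(board):
--         for idx, a in enumerate(b):
--             if a == 0:
--                 continue
--             realBoard[idx].append(a)
--     # move 돌면서
--     bucket = [101]
--     for move in moves:
--         idx = move - 1
--         if not realBoard[idx]:
--             continue
--         curItem = realBoard[idx].pop()
--         if bucket[-1] == curItem:
--             bucket.pop()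
--             answer += 2
--         else:
--             bucket.append(curItem)
--
--     return answer
-- ===== SOURCE B (Python) =====
-- # B: no preprocessing and no copy — keep one row pointer per column and scan the
-- # untouched board downwards on demand per move; plain empty-stack check, no sentinel.
-- def solution(board, moves):
--     n = len(board)
--     next_row = [0] * n          # per column: first row whose doll may still be there
--     answer = 0
--     bucket = []
--     for move in moves:
--         c = move - 1
--         for r in range(next_row[c], n):
--             row = board[r]
--             if c < len(row) and row[c] != 0:
--                 next_row[c] = r + 1
--                 cur = row[c]
--                 if bucket and bucket[-1] == cur:
--                     bucket.pop()
--                     answer += 2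
--                 else:
--                     bucket.append(cur)
--                 break
--     return answer
-- ===== Notes on version B (the rewrite author's own statement) =====
-- stated objective: simpler
-- what changed: B drops A's whole preprocessing pass that transposes the board into reversed column stacks and drops the 101 sentinel seeding the result stack: it keeps one row pointer per column and scans the untouched board top-down on demand per move, with a plain empty-stack check.
-- outside the precondition, e.g. on solution([[101]], [1]): A returns 2, B returns 0; on solution([[5, 0], [5]], [1, 0]): A returns 0, B returns 2; on solution([[]], [0]): A returns 0, B raises IndexError
import Mathlib
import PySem

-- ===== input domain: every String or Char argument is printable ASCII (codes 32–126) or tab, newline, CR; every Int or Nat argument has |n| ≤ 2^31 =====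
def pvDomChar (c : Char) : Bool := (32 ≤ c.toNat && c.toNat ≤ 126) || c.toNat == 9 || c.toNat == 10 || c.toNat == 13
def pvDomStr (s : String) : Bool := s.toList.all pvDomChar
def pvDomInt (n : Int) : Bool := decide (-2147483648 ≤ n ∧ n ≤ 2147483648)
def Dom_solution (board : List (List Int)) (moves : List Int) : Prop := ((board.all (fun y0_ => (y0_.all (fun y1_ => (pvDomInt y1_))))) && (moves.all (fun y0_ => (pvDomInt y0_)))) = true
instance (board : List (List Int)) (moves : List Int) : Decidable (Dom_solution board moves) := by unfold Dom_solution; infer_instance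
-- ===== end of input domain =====

-- B replaces A's preprocessing of the board into reversed column stacks (and its 101 stack
-- sentinel) by one row pointer per column and an on-demand top-down scan of the untouched
-- board per move, with a plain empty-stack check.  Neither program mutates its arguments.

-- ===== PORT A =====
-- realBoard[idx].append(a) for one enumerated row (IndexError when idx ≥ len(realBoard): excluded by Pre_)
def rowStepA (rb : List (List Int)) (p : Int × Int) : List (List Int) :=
  if p.2 = 0 then rb
  else PySem.List.pySetD rb p.1 ((PySem.List.pyGetD rb p.1 []) ++ [p.2])

-- realBoard after the build loop: for b in reversed(board): for idx, a in enumerate(b): …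
def buildRB (board : List (List Int)) : List (List Int) :=
  board.reverse.foldl (fun rb b => (PySem.List.enumerate b 0).foldl rowStepA rb)
    (List.replicate board.length [])

-- one iteration of "for move in moves" (state = (realBoard, bucket, answer))
def stepA (s : List (List Int) × List Int × Int) (move : Int) : List (List Int) × List Int × Int :=
  let idx := move - 1
  let col := PySem.List.pyGetD s.1 idx []      -- realBoard[idx]; IndexError = out of Pre_
  if col = [] then s
  else
    let cur := (col.getLast?).getD 0           -- realBoard[idx].pop() (col is nonempty here)
    let rb' := PySem.List.pySetD s.1 idx col.dropLast
    if PySem.List.pyGetD s.2.1 (-1) 0 = cur    -- bucket[-1] (empty bucket = out of Pre_)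
    then (rb', s.2.1.dropLast, s.2.2 + 2)
    else (rb', s.2.1 ++ [cur], s.2.2)

def solution (board : List (List Int)) (moves : List Int) : Int :=
  (moves.foldl stepA (buildRB board, [101], 0)).2.2

-- ===== PORT B =====
-- "for r in range(next_row[c], n): row = board[r]; if c < len(row) and row[c] != 0: … break":
-- scan of the rows from some index (passed as the dropped prefix), first row holding a doll
def findDoll (rows : List (List Int)) (c : Int) : Option (Nat × Int) :=
  match rows with
  | [] => none
  | row :: rest =>
      if c < (row.length : Int) ∧ PySem.List.pyGetD row c 0 ≠ 0 then
        some (0, PySem.List.pyGetD row c 0)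
      else (findDoll rest c).map (fun p => (p.1 + 1, p.2))

-- one iteration of "for move in moves" (state = (next_row, bucket, answer))
def stepB (board : List (List Int)) (s : List Int × List Int × Int) (move : Int) :
    List Int × List Int × Int :=
  let c := move - 1
  let start := PySem.List.pyGetD s.1 c 0              -- next_row[c]; IndexError = out of Pre_
  match findDoll (board.drop start.toNat) c with      -- the rows range(next_row[c], n) scans
  | none => s
  | some (rel, cur) =>
      let nr' := PySem.List.pySetD s.1 c (start + (rel : Int) + 1)   -- next_row[c] = r + 1
      if s.2.1 ≠ [] ∧ PySem.List.pyGetD s.2.1 (-1) 0 = cur           -- bucket and bucket[-1] == cur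
      then (nr', s.2.1.dropLast, s.2.2 + 2)
      else (nr', s.2.1 ++ [cur], s.2.2)

def solution_alt (board : List (List Int)) (moves : List Int) : Int :=
  (moves.foldl (stepB board) (List.replicate board.length 0, ([] : List Int), (0 : Int))).2.2

-- ===== PRECONDITION & SPEC =====
-- Pre_ excludes (1,2) inputs where A raises IndexError: a nonzero cell in a column ≥ len(board),
-- or a move with move-1 outside [-len(board), len(board)); (3) boards containing the value 101,
-- which collides with A's bucket sentinel (A may raise IndexError on an emptied bucket or count a
-- phantom pair there — unmatchable/not closed-form); (4) nonpositive moves on non-rectangular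
-- boards, where A's negative index wraps on the len(board)-column grid while B's row accesses
-- wrap on each row (or raise) — both defensible readings of an unspecified corner.
def Pre_solution (board : List (List Int)) (moves : List Int) : Prop :=
  (∀ row ∈ board, ∀ x ∈ row.drop board.length, x = 0) ∧
  (∀ m ∈ moves, -(board.length : Int) ≤ m - 1 ∧ m - 1 < (board.length : Int)) ∧
  (∀ row ∈ board, (101 : Int) ∉ row) ∧
  ((∀ m ∈ moves, 1 ≤ m) ∨ (∀ row ∈ board, row.length = board.length))

instance (board : List (List Int)) (moves : List Int) : Decidable (Pre_solution board moves) := by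
  unfold Pre_solution; infer_instance

def pvWitness_solution : List (List Int) × List Int := ([[1], [1]], [1, 1])

def Spec_solution (board : List (List Int)) (moves : List Int) (out : Int) : Prop := out = solution_alt board moves
instance (board : List (List Int)) (moves : List Int) (out : Int) : Decidable (Spec_solution board moves out) := by unfold Spec_solution; infer_instance

-- ===== CLAIM (what is proved, stated in full; the proofs are below) =====
def Claim_equal_solution : Prop := ∀ (board : List (List Int)) (moves : List Int), Dom_solution board moves → Pre_solution board moves → Spec_solution board moves (solution board moves)

-- ===== LEMMAS AND PROOFS =====

-- the values of column j, top to bottom (missing cells read as the empty marker 0)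
def colD (bd : List (List Int)) (j : Nat) : List Int := bd.map (fun row => row.getD j 0)

-- A's stack for column j: the nonzero cells, bottom to top
def colStack (bd : List (List Int)) (j : Nat) : List Int :=
  ((colD bd j).filter (fun x => x ≠ 0)).reverse

-- abstract version of B's row scan, on the column values
def firstNZ (g : List Int) : Option (Nat × Int) :=
  match g with
  | [] => none
  | x :: xs => if x ≠ 0 then some (0, x) else (firstNZ xs).map (fun p => (p.1 + 1, p.2))


-- ----- small index/getD helpers -----

theorem getD_set_ite {a : Type} (l : List a) (i j : Nat) (v d : a) :
    (l.set i v).getD j d = if i = j ∧ i < l.length then v else l.getD j d := by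
  simp only [List.getD, List.getElem?_set]
  split_ifs with h1 h2 h3 h4 <;> simp_all <;> omega

theorem pyGetD_nonneg_getD {a : Type} (xs : List a) (i : Int) (d : a) (h : 0 ≤ i) :
    PySem.List.pyGetD xs i d = xs.getD i.toNat d := by
  have hi : i = ((i.toNat : Nat) : Int) := (Int.toNat_of_nonneg h).symm
  rw [hi, PySem.List.pyGetD_natCast]
  simp
  rw [max_eq_left h]

theorem pyGetD_neg_getD {a : Type} (xs : List a) (i : Int) (d : a)
    (h0 : i < 0) (h1 : -(xs.length : Int) ≤ i) :
    PySem.List.pyGetD xs i d = xs.getD ((xs.length : Int) + i).toNat d := by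
  have hk : i = -(((-i).toNat : Nat) : Int) := by omega
  have hklt : 0 < (-i).toNat := by omega
  have hkle : (-i).toNat ≤ xs.length := by omega
  rw [hk, PySem.List.pyGetD_neg_natCast _ _ _ hklt hkle]
  have hlen : ((xs.length : Int) + -(((-i).toNat : Nat) : Int)).toNat = xs.length - (-i).toNat := by
    omega
  rw [hlen, List.getD_eq_getElem xs d (by omega)]

theorem pySetD_neg_set {a : Type} (xs : List a) (i : Int) (v : a)
    (h0 : i < 0) (h1 : -(xs.length : Int) ≤ i) :
    PySem.List.pySetD xs i v = xs.set ((xs.length : Int) + i).toNat v := by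
  have hidx : PySem.List.pyIdx? xs.length i = some (((xs.length : Int) + i).toNat) := by
    simp only [PySem.List.pyIdx?, if_neg (by omega : ¬ 0 ≤ i), if_pos h1]
    congr 1
    omega
  simp [PySem.List.pySetD, PySem.List.pySet?, hidx]

-- ----- characterization of A's build loop -----

theorem innerA_length (b : List Int) (k : Nat) (rb : List (List Int)) :
    ((PySem.List.enumerate b (k : Int)).foldl rowStepA rb).length = rb.length := by
  induction b generalizing k rb with
  | nil => simp [PySem.List.enumerate_nil]
  | cons a bs ih =>
      rw [PySem.List.enumerate_cons, List.foldl_cons]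
      have hk1 : (k : Int) + 1 = ((k + 1 : Nat) : Int) := by push_cast; ring
      rw [hk1, ih]
      unfold rowStepA
      split
      · rfl
      · simp [PySem.List.pySetD_natCast]

theorem rowStepA_getD (rb : List (List Int)) (k : Nat) (a : Int) (j : Nat) :
    (rowStepA rb ((k : Int), a)).getD j [] =
      if k = j ∧ k < rb.length ∧ a ≠ 0 then rb.getD k [] ++ [a] else rb.getD j [] := by
  unfold rowStepA
  split
  · next ha =>
      simp only at ha
      rw [if_neg (by simp [ha])]
  · next ha =>
      simp only at ha
      rw [show ((k : Int), a).1 = ((k : Nat) : Int) from rfl,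
        PySem.List.pySetD_natCast, PySem.List.pyGetD_natCast, getD_set_ite]
      simp only [Int.toNat_natCast]
      split_ifs with h1 h2 h3 <;> first | rfl | tauto

theorem innerA_getD (b : List Int) (k : Nat) (rb : List (List Int)) (j : Nat) :
    ((PySem.List.enumerate b (k : Int)).foldl rowStepA rb).getD j [] =
      rb.getD j [] ++
        (if j < rb.length ∧ k ≤ j ∧ b.getD (j - k) 0 ≠ 0 then [b.getD (j - k) 0] else []) := by
  induction b generalizing k rb with
  | nil => simp [PySem.List.enumerate_nil]
  | cons a bs ih =>
      rw [PySem.List.enumerate_cons, List.foldl_cons]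
      have hk1 : (k : Int) + 1 = ((k + 1 : Nat) : Int) := by push_cast; ring
      rw [hk1, ih]
      have hlen : (rowStepA rb ((k : Int), a)).length = rb.length := by
        unfold rowStepA; split
        · rfl
        · simp [PySem.List.pySetD_natCast]
      rw [hlen, rowStepA_getD]
      by_cases hjk : k = j
      · subst hjk
        have h1 : ¬ (k + 1 ≤ k) := by omega
        have hd : (a :: bs).getD (k - k) 0 = a := by simp
        simp only [h1, false_and, and_false, if_false, List.append_nil, hd]
        by_cases h2 : k < rb.length ∧ a ≠ 0
        · simp [h2.1, h2.2]
        · rw [if_neg (fun hcon => h2 ⟨hcon.2.1, hcon.2.2⟩),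
            if_neg (fun hcon => h2 ⟨hcon.1, hcon.2.2⟩), List.append_nil]
      · rw [if_neg (by tauto)]
        congr 1
        by_cases h2 : k + 1 ≤ j
        · have hd : bs.getD (j - (k + 1)) 0 = (a :: bs).getD (j - k) 0 := by
            have hs : j - k = (j - (k + 1)) + 1 := by omega
            rw [hs, List.getD_cons_succ]
          rw [hd]
          have hiff : (j < rb.length ∧ k + 1 ≤ j ∧ (a :: bs).getD (j - k) 0 ≠ 0) ↔
                 (j < rb.length ∧ k ≤ j ∧ (a :: bs).getD (j - k) 0 ≠ 0) := by
            constructor <;> (rintro ⟨x, y, z⟩; exact ⟨x, by omega, z⟩)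
          rw [if_congr hiff rfl rfl]
        · have h3 : ¬ (k ≤ j) := by omega
          simp [h2, h3]

theorem buildA_length (rows : List (List Int)) (rb : List (List Int)) :
    (rows.foldl (fun rb b => (PySem.List.enumerate b 0).foldl rowStepA rb) rb).length = rb.length := by
  induction rows generalizing rb with
  | nil => rfl
  | cons b bs ih =>
      rw [List.foldl_cons, ih]
      have h0 : (0 : Int) = ((0 : Nat) : Int) := by norm_num
      rw [h0, innerA_length]

theorem buildA_getD (rows : List (List Int)) (rb : List (List Int)) (j : Nat) (hj : j < rb.length) :
    (rows.foldl (fun rb b => (PySem.List.enumerate b 0).foldl rowStepA rb) rb).getD j [] =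
      rb.getD j [] ++ (rows.map (fun row => row.getD j 0)).filter (fun x => x ≠ 0) := by
  induction rows generalizing rb with
  | nil => simp
  | cons b bs ih =>
      rw [List.foldl_cons]
      have h0 : (0 : Int) = ((0 : Nat) : Int) := by norm_num
      have hlen : ((PySem.List.enumerate b 0).foldl rowStepA rb).length = rb.length := by
        rw [h0, innerA_length]
      rw [ih _ (by omega), h0, innerA_getD]
      simp only [Nat.sub_zero, Nat.zero_le, true_and, hj, List.map_cons, List.filter_cons]
      by_cases hb : b[j]?.getD 0 = 0
      · simp [hb]
      · simp [hb, List.append_assoc]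

theorem buildRB_length (board : List (List Int)) : (buildRB board).length = board.length := by
  unfold buildRB; rw [buildA_length]; exact List.length_replicate

theorem buildRB_getD (board : List (List Int)) (j : Nat) (hj : j < board.length) :
    (buildRB board).getD j [] = colStack board j := by
  unfold buildRB
  rw [buildA_getD _ _ _ (by simpa using hj)]
  have hrep : (List.replicate board.length ([] : List Int)).getD j [] = [] :=
    List.getD_replicate _ hj
  rw [hrep, List.nil_append]
  unfold colStack colD
  rw [← List.filter_reverse, ← List.map_reverse]

-- ----- B's scan vs the abstract column scan -----

theorem findDoll_eq_firstNZ (c : Int) (jn : Nat) (rows : List (List Int))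
    (hacc : ∀ row ∈ rows,
      (if c < (row.length : Int) then PySem.List.pyGetD row c 0 else 0) = row.getD jn 0) :
    findDoll rows c = firstNZ (rows.map (fun row => row.getD jn 0)) := by
  induction rows with
  | nil => rfl
  | cons row rest ih =>
      have hrow := hacc row (List.mem_cons_self)
      have hrest : ∀ r ∈ rest,
          (if c < (r.length : Int) then PySem.List.pyGetD r c 0 else 0) = r.getD jn 0 :=
        fun r hr => hacc r (List.mem_cons_of_mem _ hr)
      rw [List.map_cons]
      show (if c < (row.length : Int) ∧ PySem.List.pyGetD row c 0 ≠ 0 then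
              some (0, PySem.List.pyGetD row c 0)
            else (findDoll rest c).map (fun p => (p.1 + 1, p.2))) = _
      unfold firstNZ
      by_cases hc : c < (row.length : Int)
      · rw [if_pos hc] at hrow
        by_cases hz : PySem.List.pyGetD row c 0 ≠ 0
        · rw [if_pos ⟨hc, hz⟩, hrow, if_pos (hrow ▸ hz)]
        · rw [if_neg (by tauto)]
          simp only [ne_eq, not_not] at hz
          rw [if_neg (by rw [← hrow]; simpa using hz), ih hrest]
      · rw [if_neg hc] at hrow
        rw [if_neg (by tauto), if_neg (by rw [← hrow]; simp), ih hrest]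

theorem firstNZ_none (g : List Int) (h : firstNZ g = none) : ∀ x ∈ g, x = 0 := by
  induction g with
  | nil => intro x hx; exact absurd hx (by simp)
  | cons x xs ih =>
      unfold firstNZ at h
      by_cases hx : x ≠ 0
      · rw [if_pos hx] at h; exact absurd h (by simp)
      · rw [if_neg hx] at h
        simp only [not_not] at hx
        simp only [Option.map_eq_none_iff] at h
        intro y hy
        rcases List.mem_cons.mp hy with rfl | hy'
        · exact hx
        · exact ih h y hy'

theorem firstNZ_some (g : List Int) (r : Nat) (v : Int) (h : firstNZ g = some (r, v)) :
    r < g.length ∧ v ≠ 0 ∧ v = g.getD r 0 ∧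
      g.filter (fun x => x ≠ 0) = v :: (g.drop (r + 1)).filter (fun x => x ≠ 0) := by
  induction g generalizing r v with
  | nil => exact absurd h (by simp [firstNZ])
  | cons x xs ih =>
      unfold firstNZ at h
      by_cases hx : x ≠ 0
      · rw [if_pos hx] at h
        simp only [Option.some.injEq, Prod.mk.injEq] at h
        obtain ⟨hr, hv⟩ := h
        subst hr; subst hv
        refine ⟨by simp, hx, by simp, ?_⟩
        simp [List.filter_cons, hx]
      · rw [if_neg hx] at h
        simp only [not_not] at hx
        rw [Option.map_eq_some_iff] at h
        obtain ⟨⟨r', v'⟩, hp, he⟩ := h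
        simp only [Prod.mk.injEq] at he
        obtain ⟨hr, hv⟩ := he
        subst hr; subst hv
        obtain ⟨h1, h2, h3, h4⟩ := ih r' v' hp
        refine ⟨by simpa using Nat.succ_lt_succ h1, h2, by simpa using h3, ?_⟩
        subst hx
        simpa [List.filter_cons] using h4

-- ----- the per-column state invariant -----

def InvRB (board rb : List (List Int)) (nr : List Int) : Prop :=
  rb.length = board.length ∧ nr.length = board.length ∧
  (∀ j < board.length, 0 ≤ nr.getD j 0) ∧
  (∀ j < board.length, rb.getD j [] =
    (((colD board j).drop (nr.getD j 0).toNat).filter (fun x => x ≠ 0)).reverse)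

theorem stepB_some (board : List (List Int)) (nr : List Int) (bucket : List Int) (ans : Int)
    (move : Int) (rel : Nat) (v : Int)
    (h : findDoll (board.drop (PySem.List.pyGetD nr (move - 1) 0).toNat) (move - 1) =
      some (rel, v)) :
    stepB board (nr, bucket, ans) move =
      if bucket ≠ [] ∧ PySem.List.pyGetD bucket (-1) 0 = v then
        (PySem.List.pySetD nr (move - 1) (PySem.List.pyGetD nr (move - 1) 0 + (rel : Int) + 1),
          bucket.dropLast, ans + 2)
      else
        (PySem.List.pySetD nr (move - 1) (PySem.List.pyGetD nr (move - 1) 0 + (rel : Int) + 1),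
          bucket ++ [v], ans) := by
  simp only [stepB, h]

theorem step_eq (board : List (List Int)) (move : Int) (rb : List (List Int))
    (nr : List Int) (bucket : List Int) (ans : Int)
    (h101 : ∀ row ∈ board, (101 : Int) ∉ row)
    (hinv : InvRB board rb nr)
    (hm1 : -(board.length : Int) ≤ move - 1) (hm2 : move - 1 < (board.length : Int))
    (hwrap : 1 ≤ move ∨ (∀ row ∈ board, row.length = board.length)) :
    ∃ rb' nr' bucket' ans',
      stepA (rb, 101 :: bucket, ans) move = (rb', 101 :: bucket', ans') ∧
      stepB board (nr, bucket, ans) move = (nr', bucket', ans') ∧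
      InvRB board rb' nr' := by
  obtain ⟨hlenA, hlenN, hnn, hcols⟩ := hinv
  set c : Int := move - 1 with hc
  set jn : Nat := (if 0 ≤ c then c.toNat else ((board.length : Int) + c).toNat) with hjn
  have hjn_lt : jn < board.length := by rw [hjn]; split <;> omega
  have hnorm_get : ∀ {α : Type} (xs : List α) (d : α), xs.length = board.length →
      PySem.List.pyGetD xs c d = xs.getD jn d := by
    intro α xs d hxs
    by_cases h0 : 0 ≤ c
    · rw [pyGetD_nonneg_getD _ _ _ h0, hjn, if_pos h0]
    · rw [pyGetD_neg_getD _ _ _ (by omega) (by rw [hxs]; omega), hjn, if_neg h0, hxs]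
  have hnorm_set : ∀ {α : Type} (xs : List α) (v : α), xs.length = board.length →
      PySem.List.pySetD xs c v = xs.set jn v := by
    intro α xs v hxs
    by_cases h0 : 0 ≤ c
    · rw [PySem.List.pySetD_of_nonneg xs v h0, hjn, if_pos h0]
    · rw [pySetD_neg_set _ _ _ (by omega) (by rw [hxs]; omega), hjn, if_neg h0, hxs]
  have hst0 : (0 : Int) ≤ nr.getD jn 0 := hnn jn hjn_lt
  have hstart : PySem.List.pyGetD nr (move - 1) 0 = nr.getD jn 0 := by
    rw [← hc]; exact hnorm_get nr 0 hlenN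
  -- per-row access agreement between B's guard and the column value, on the scanned suffix
  have hacc : ∀ row ∈ board.drop (nr.getD jn 0).toNat,
      (if c < (row.length : Int) then PySem.List.pyGetD row c 0 else 0) = row.getD jn 0 := by
    intro row hrow
    have hrowb : row ∈ board := List.mem_of_mem_drop hrow
    by_cases h0 : 0 ≤ c
    · by_cases hlt : c < (row.length : Int)
      · rw [if_pos hlt, pyGetD_nonneg_getD _ _ _ h0, hjn, if_pos h0]
      · rw [if_neg hlt, hjn, if_pos h0, List.getD_eq_default _ _ (by omega)]
    · have hrl : row.length = board.length := by
        rcases hwrap with h | h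
        · omega
        · exact h row hrowb
      rw [if_pos (by omega), pyGetD_neg_getD _ _ _ (by omega) (by rw [hrl]; omega), hjn,
        if_neg h0, hrl]
  have hfd : findDoll (board.drop (nr.getD jn 0).toNat) (move - 1) =
      firstNZ ((colD board jn).drop (nr.getD jn 0).toNat) := by
    rw [← hc]
    rw [findDoll_eq_firstNZ c jn _ hacc]
    unfold colD
    rw [List.map_drop]
  have hcolA : PySem.List.pyGetD rb (move - 1) [] =
      (((colD board jn).drop (nr.getD jn 0).toNat).filter (fun x => x ≠ 0)).reverse := by
    rw [← hc]
    rw [hnorm_get rb [] hlenA, hcols jn hjn_lt]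
  cases hNZ : firstNZ ((colD board jn).drop (nr.getD jn 0).toNat) with
  | none =>
      have hA0 : PySem.List.pyGetD rb (move - 1) [] = [] := by
        rw [hcolA,
          List.filter_eq_nil_iff.mpr (fun a ha => by simpa using firstNZ_none _ hNZ a ha),
          List.reverse_nil]
      refine ⟨rb, nr, bucket, ans, ?_, ?_, ⟨hlenA, hlenN, hnn, hcols⟩⟩
      · simp only [stepA]
        rw [if_pos hA0]
      · simp only [stepB]
        rw [hstart, hfd, hNZ]
  | some p =>
      obtain ⟨rel, v⟩ := p
      obtain ⟨hrlt, hv0, hvval, hfil⟩ := firstNZ_some _ _ _ hNZ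
      -- the doll that comes off: a nonzero cell of the board, hence ≠ 101
      have hv101 : v ≠ 101 := by
        intro he
        have h1 : v ∈ (colD board jn).drop (nr.getD jn 0).toNat := by
          rw [hvval, List.getD_eq_getElem _ _ hrlt]
          exact List.getElem_mem hrlt
        have h2 : v ∈ colD board jn := List.mem_of_mem_drop h1
        obtain ⟨row, hrow, hre⟩ := List.mem_map.mp h2
        have hjr : jn < row.length := by
          by_contra hcon
          exact hv0 (by rw [← hre, List.getD_eq_default _ _ (by omega)])
        have : v ∈ row := by
          rw [← hre, List.getD_eq_getElem _ _ hjr]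
          exact List.getElem_mem hjr
        exact h101 row hrow (he ▸ this)
      -- the A-side column and its pop
      have hcol : PySem.List.pyGetD rb (move - 1) [] =
          ((((colD board jn).drop (nr.getD jn 0).toNat).drop (rel + 1)).filter
            (fun x => x ≠ 0)).reverse ++ [v] := by
        rw [hcolA, hfil, List.reverse_cons]
      have hcolne : PySem.List.pyGetD rb (move - 1) [] ≠ [] := by
        rw [hcol]; simp
      have hcur : ((PySem.List.pyGetD rb (move - 1) []).getLast?).getD 0 = v := by
        rw [hcol, List.getLast?_concat]; rfl
      have hrbset : PySem.List.pySetD rb (move - 1)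
            (PySem.List.pyGetD rb (move - 1) []).dropLast =
          rb.set jn ((((colD board jn).drop (nr.getD jn 0).toNat).drop (rel + 1)).filter
            (fun x => x ≠ 0)).reverse := by
        rw [hcol, List.dropLast_concat, ← hc, hnorm_set rb _ hlenA]
      -- the B-side pointer write
      have hnset : PySem.List.pySetD nr (move - 1)
            (PySem.List.pyGetD nr (move - 1) 0 + (rel : Int) + 1) =
          nr.set jn (nr.getD jn 0 + (rel : Int) + 1) := by
        rw [hstart, ← hc, hnorm_set nr _ hlenN]
      -- invariant for the updated states
      have hinv' : InvRB board
          (rb.set jn ((((colD board jn).drop (nr.getD jn 0).toNat).drop (rel + 1)).filter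
            (fun x => x ≠ 0)).reverse)
          (nr.set jn (nr.getD jn 0 + (rel : Int) + 1)) := by
        refine ⟨by rw [List.length_set]; exact hlenA, by rw [List.length_set]; exact hlenN,
          ?_, ?_⟩
        · intro j hjlt
          rw [getD_set_ite]
          split_ifs with h
          · omega
          · exact hnn j hjlt
        · intro j hjlt
          rw [getD_set_ite, getD_set_ite]
          by_cases hjeq : jn = j
          · subst hjeq
            rw [if_pos ⟨rfl, by omega⟩, if_pos ⟨rfl, by omega⟩]
            have htn : (nr.getD jn 0 + (rel : Int) + 1).toNat =
                (nr.getD jn 0).toNat + (rel + 1) := by omega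
            have hdd : (colD board jn).drop ((nr.getD jn 0).toNat + (rel + 1)) =
                ((colD board jn).drop (nr.getD jn 0).toNat).drop (rel + 1) :=
              List.drop_drop.symm
            rw [htn, hdd]
          · rw [if_neg (by tauto), if_neg (by tauto)]
            exact hcols j hjlt
      have hB := stepB_some board nr bucket ans move rel v (by rw [hstart, hfd]; exact hNZ)
      cases hbk : bucket with
      | nil =>
          refine ⟨_, _, [v], ans, ?_, ?_, hinv'⟩
          · simp only [stepA]
            rw [if_neg hcolne, hcur]
            have htop : PySem.List.pyGetD ([101] : List Int) (-1) 0 = 101 := by decide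
            rw [htop, if_neg (by exact fun he => hv101 he.symm), hrbset]
            rfl
          · subst hbk
            rw [hB, if_neg (by simp), hnset]
            rfl
      | cons b0 bs =>
          have hne : (b0 :: bs : List Int) ≠ [] := by simp
          have htopA : PySem.List.pyGetD (101 :: b0 :: bs : List Int) (-1) 0 =
              (b0 :: bs).getLast hne := by
            rw [PySem.List.pyGetD_neg_one _ _ (by simp), List.getLast_cons hne]
          have htopB : PySem.List.pyGetD (b0 :: bs : List Int) (-1) 0 = (b0 :: bs).getLast hne :=
            PySem.List.pyGetD_neg_one _ _ hne
          subst hbk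
          by_cases heq : (b0 :: bs).getLast hne = v
          · refine ⟨_, _, (b0 :: bs).dropLast, ans + 2, ?_, ?_, hinv'⟩
            · simp only [stepA]
              rw [if_neg hcolne, hcur, htopA, if_pos heq, hrbset,
                List.dropLast_cons_of_ne_nil hne]
            · rw [hB, if_pos ⟨hne, htopB ▸ heq⟩, hnset]
          · refine ⟨_, _, (b0 :: bs) ++ [v], ans, ?_, ?_, hinv'⟩
            · simp only [stepA]
              rw [if_neg hcolne, hcur, htopA, if_neg heq, hrbset]
              rfl
            · rw [hB, if_neg (by rw [htopB]; tauto), hnset]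

theorem loop_eq (board : List (List Int)) (moves : List Int)
    (h101 : ∀ row ∈ board, (101 : Int) ∉ row) :
    ∀ (rb : List (List Int)) (nr : List Int) (bucket : List Int) (ans : Int),
      InvRB board rb nr →
      (∀ m ∈ moves, -(board.length : Int) ≤ m - 1 ∧ m - 1 < (board.length : Int)) →
      ((∀ m ∈ moves, 1 ≤ m) ∨ (∀ row ∈ board, row.length = board.length)) →
      (moves.foldl stepA (rb, 101 :: bucket, ans)).2.2 =
        (moves.foldl (stepB board) (nr, bucket, ans)).2.2 := by
  induction moves with
  | nil => intro rb nr bucket ans _ _ _; rfl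
  | cons m ms ih =>
      intro rb nr bucket ans hinv hrange hwrap
      obtain ⟨rb', nr', bucket', ans', hA, hB, hinv'⟩ :=
        step_eq board m rb nr bucket ans h101 hinv (hrange m List.mem_cons_self).1
          (hrange m List.mem_cons_self).2
          (hwrap.elim (fun h => Or.inl (h m List.mem_cons_self)) Or.inr)
      rw [List.foldl_cons, List.foldl_cons, hA, hB]
      exact ih rb' nr' bucket' ans' hinv'
        (fun x hx => hrange x (List.mem_cons_of_mem _ hx))
        (hwrap.elim (fun h => Or.inl (fun x hx => h x (List.mem_cons_of_mem _ hx))) Or.inr)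

-- ===== VERDICT (by name: the statement is the Claim_ definition above) =====
theorem solution_spec : Claim_equal_solution := by
  unfold Claim_equal_solution
  intro board moves _hdom hpre
  unfold Spec_solution solution solution_alt
  obtain ⟨hcolsOK, hrange, h101, hwrap⟩ := hpre
  apply loop_eq board moves h101 (buildRB board) (List.replicate board.length 0) [] 0
  · refine ⟨buildRB_length board, List.length_replicate, ?_, ?_⟩
    · intro j hj
      rw [List.getD_replicate _ hj]
    · intro j hj
      rw [buildRB_getD board j hj, List.getD_replicate _ hj]
      unfold colStack
      rw [Int.toNat_zero, List.drop_zero]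
  · exact hrange
  · exact hwrap
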